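-- pv_equiv track=rewrite | github.com/CheeAn-Yu/NTU-Computer-Vision | v2_hw7.py | IB
-- ===== SOURCE A (Python) =====
-- def h(c,d):
-- 	if c==d:
-- 		return 255
-- 	elif c!=d:
-- 		return 0
--
-- def f(c):
-- 	if c==0:
-- 		return "b"
-- 	elif c!=0:
-- 		return "i"
--
-- def IB(img):#thinning
-- 	#row,col=img.shape
-- 	row=len(img)
-- 	col=len(img)
-- 	new=[[" "for i in range(row+2)] for i in range(col+2)]
-- 	res=[[" "for i in range(row+2)] for i in range(col+2)]
-- 	fres=[[" "for i in range(row)] for i in range(col)]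
-- 	for i in range(row):
-- 		for j in range(col):
-- 			if img[i][j]==255:
-- 				new[i+1][j+1]=img[i][j]
-- 	for i in range(1,row+1):
-- 		for j in range(1,col+1):
-- 			if new[i][j]==255:
-- 				a0=new[i][j]
-- 				a1=h(a0,new[i][j+1])
-- 				a2=h(a1,new[i-1][j])
-- 				a3=h(a2,new[i][j-1])
-- 				a4=h(a3,new[i+1][j])
--
-- 				res[i][j]=f(a4)
--
--
-- 	for i in range(row):
-- 		for j in range(col):
-- 			fres[i][j]=res[i+1][j+1]
--
--
-- 	return fres
-- ===== SOURCE B (Python) =====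
-- def IB(img):
--     n = len(img)
--     white = {(i, j) for i in range(n) for j in range(n) if img[i][j] == 255}
--     interior = white
--     for d in ((0, 1), (-1, 0), (0, -1), (1, 0)):
--         interior = interior & {(i - d[0], j - d[1]) for (i, j) in white}
--     return [[" " if (i, j) not in white else ("i" if (i, j) in interior else "b")
--              for j in range(n)] for i in range(n)]
-- ===== Notes on version B (the rewrite author's own statement) =====
-- stated objective: alternative
-- what changed: B replaces A's three padded-grid passes and per-pixel chained h/f sentinel arithmetic by a morphological erosion on a coordinate set: it builds the set of white-pixel coordinates once, intersects it with its four shifted copies to obtain the interior set, and renders the grid by set membership.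
import Mathlib
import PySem

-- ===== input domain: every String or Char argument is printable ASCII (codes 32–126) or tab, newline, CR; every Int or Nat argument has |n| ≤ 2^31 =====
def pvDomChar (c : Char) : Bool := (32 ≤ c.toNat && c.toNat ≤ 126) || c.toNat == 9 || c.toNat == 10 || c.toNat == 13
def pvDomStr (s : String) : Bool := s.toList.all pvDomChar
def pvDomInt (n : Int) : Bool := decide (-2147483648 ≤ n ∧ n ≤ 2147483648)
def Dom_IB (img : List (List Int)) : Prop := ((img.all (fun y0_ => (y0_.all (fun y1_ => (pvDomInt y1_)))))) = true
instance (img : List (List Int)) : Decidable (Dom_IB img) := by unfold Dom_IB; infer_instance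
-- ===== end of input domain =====

-- B computes the interior set by intersecting the white-coordinate set with its four shifted
-- copies (set-based erosion) instead of A's three padded-grid passes (alternative algorithm).
-- A mutates only lists it creates locally; the caller observes no mutation.


-- ===== PORT A =====
-- 2-D helpers for A's port: g[i][j] read with a default (inside Pre_ every read is in range, so the
-- default is never the returned value of an in-range Python access) and g[i][j] = v write
def get2 {α : Type} (g : List (List α)) (i j : Nat) (d : α) : α := (g.getD i []).getD j d
def set2 {α : Type} (g : List (List α)) (i j : Nat) (v : α) : List (List α) := g.set i ((g.getD i []).set j v)

-- cells of `new` are Python's " " (here none) or the int 255 (some 255); Python's int/str `==` is Option equality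
def hA (c d : Option Int) : Option Int := if c = d then some 255 else some 0
def fA (c : Option Int) : String := if c = some 0 then "b" else "i"

-- first pass: copy the 255 pixels into the padded grid (Python: new[i+1][j+1] = img[i][j])
def newGrid (img : List (List Int)) : List (List (Option Int)) :=
  (List.range img.length).foldl (fun g i =>
    (List.range img.length).foldl (fun g j =>
      if get2 img i j 0 = 255 then set2 g (i+1) (j+1) (some (get2 img i j 0)) else g) g)
    (List.replicate (img.length+2) (List.replicate (img.length+2) (none : Option Int)))

-- second pass: Python's `for i in range(1,row+1)` is folded with i = i0+1, j = j0+1, i0,j0 in range(row)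
def resGrid (img : List (List Int)) : List (List String) :=
  let new := newGrid img
  (List.range img.length).foldl (fun g i0 =>
    (List.range img.length).foldl (fun g j0 =>
      if get2 new (i0+1) (j0+1) none = some 255 then
        set2 g (i0+1) (j0+1)
          (let a0 := get2 new (i0+1) (j0+1) none
           let a1 := hA a0 (get2 new (i0+1) (j0+1+1) none)
           let a2 := hA a1 (get2 new i0 (j0+1) none)
           let a3 := hA a2 (get2 new (i0+1) j0 none)
           let a4 := hA a3 (get2 new (i0+1+1) (j0+1) none)
           fA a4)
      else g) g)
    (List.replicate (img.length+2) (List.replicate (img.length+2) " "))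

-- third pass: fres[i][j] = res[i+1][j+1]
def IB (img : List (List Int)) : List (List String) :=
  let res := resGrid img
  (List.range img.length).foldl (fun g i =>
    (List.range img.length).foldl (fun g j =>
      set2 g i j (get2 res (i+1) (j+1) " ")) g)
    (List.replicate img.length (List.replicate img.length " "))

-- ===== PORT B =====
-- white = {(i, j) for i in range(n) for j in range(n) if img[i][j] == 255}
def whiteSet (img : List (List Int)) : PySem.Set (Int × Int) :=
  PySem.Set.ofList ((List.range img.length).flatMap (fun i =>
    (List.range img.length).filterMap (fun j =>
      if (img.getD i []).getD j 0 = 255 then some ((i : Int), (j : Int)) else none)))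

-- {(i - d[0], j - d[1]) for (i, j) in white}
def shiftSet (w : PySem.Set (Int × Int)) (d : Int × Int) : PySem.Set (Int × Int) :=
  PySem.Set.ofList (w.map (fun p => (p.1 - d.1, p.2 - d.2)))

-- interior = white intersected with its four shifted copies; render by membership
def IB_alt (img : List (List Int)) : List (List String) :=
  let n := img.length
  let white := whiteSet img
  let interior := [((0 : Int), (1 : Int)), (-1, 0), (0, -1), (1, 0)].foldl
      (fun acc d => PySem.Set.inter acc (shiftSet white d)) white
  (List.range n).map (fun (i : Nat) => (List.range n).map (fun (j : Nat) =>
    if (((i : Nat) : Int), ((j : Nat) : Int)) ∉ white then " "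
    else if (((i : Nat) : Int), ((j : Nat) : Int)) ∈ interior then "i" else "b"))

-- ===== PRECONDITION & SPEC =====
-- Pre_IB excludes exactly the jagged inputs (some row shorter than len(img)) on which the Python A raises IndexError.
def Pre_IB (img : List (List Int)) : Prop := (img.all (fun r => decide (img.length ≤ r.length))) = true
instance (img : List (List Int)) : Decidable (Pre_IB img) := by unfold Pre_IB; infer_instance
def pvWitness_IB : List (List Int) := [[255, 0], [255, 255]]

def Spec_IB (img : List (List Int)) (out : List (List String)) : Prop := out = IB_alt img
instance (img : List (List Int)) (out : List (List String)) : Decidable (Spec_IB img out) := by unfold Spec_IB; infer_instance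

-- ===== CLAIM (what is proved, stated in full; the proofs are below) =====
def Claim_equal_IB : Prop := ∀ (img : List (List Int)), Dom_IB img → Pre_IB img → Spec_IB img (IB img)

-- ===== LEMMAS AND PROOFS =====

def Shape {α : Type} (g : List (List α)) (R C : Nat) : Prop :=
  g.length = R ∧ ∀ r ∈ g, r.length = C

lemma shape_replicate {α : Type} (R C : Nat) (v : α) :
    Shape (List.replicate R (List.replicate C v)) R C := by
  refine ⟨by simp, fun r hr => ?_⟩
  rw [List.eq_of_mem_replicate hr]; simp

lemma shape_set2 {α : Type} {g : List (List α)} {R C : Nat} (h : Shape g R C)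
    (i j : Nat) (v : α) : Shape (set2 g i j v) R C := by
  obtain ⟨h1, h2⟩ := h
  by_cases hi : i < g.length
  · refine ⟨by simp [set2, h1], fun r hr => ?_⟩
    rcases List.mem_or_eq_of_mem_set hr with hr | rfl
    · exact h2 r hr
    · rw [List.length_set, List.getD_eq_getElem g [] hi]
      exact h2 _ (List.getElem_mem hi)
  · rw [set2, List.set_eq_of_length_le (by omega)]
    exact ⟨h1, h2⟩

lemma shape_foldl {α β : Type} {R C : Nat} (step : List (List α) → β → List (List α))
    (hstep : ∀ g b, Shape g R C → Shape (step g b) R C) :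
    ∀ (l : List β) (g : List (List α)), Shape g R C → Shape (l.foldl step g) R C := by
  intro l
  induction l with
  | nil => intro g hg; exact hg
  | cons b l ih => intro g hg; exact ih _ (hstep g b hg)

lemma get2_set2_self {α : Type} {g : List (List α)} {R C : Nat} (h : Shape g R C)
    {i j : Nat} (hi : i < R) (hj : j < C) (v d : α) :
    get2 (set2 g i j v) i j d = v := by
  have hlen : i < g.length := by rw [h.1]; exact hi
  have hrow : (g.getD i []).length = C := by
    rw [List.getD_eq_getElem g [] hlen]; exact h.2 _ (List.getElem_mem hlen)
  unfold get2 set2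
  rw [List.getD_eq_getElem _ [] (by simpa using hlen), List.getElem_set_self,
      List.getD_eq_getElem _ d (by rw [List.length_set, hrow]; exact hj), List.getElem_set_self]

lemma get2_set2_ne {α : Type} (g : List (List α)) {i j x y : Nat}
    (hne : i ≠ x ∨ j ≠ y) (v d : α) :
    get2 (set2 g i j v) x y d = get2 g x y d := by
  unfold get2 set2
  by_cases hix : i = x
  · subst hix
    have hj : j ≠ y := hne.resolve_left (fun h => h rfl)
    by_cases hlen : i < g.length
    · have hrowstep : ∀ (row : List α), (row.set j v).getD y d = row.getD y d := fun row => by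
        rw [List.getD_eq_getElem?_getD, List.getElem?_set_ne hj, ← List.getD_eq_getElem?_getD]
      rw [List.getD_eq_getElem _ [] (by simpa using hlen), List.getElem_set_self, hrowstep,
          List.getD_eq_getElem g [] hlen]
    · rw [List.set_eq_of_length_le (by omega)]
  · have hx2 : (g.set i ((g.getD i []).set j v)).getD x [] = g.getD x [] := by
      rw [List.getD_eq_getElem?_getD, List.getElem?_set_ne hix, ← List.getD_eq_getElem?_getD]
    rw [hx2]

lemma inner_char {α : Type} (P : Nat → Prop) [DecidablePred P] (v : Nat → α) {R C : Nat}
    (I b : Nat) (hI : I < R) :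
    ∀ (m : Nat) (g : List (List α)), Shape g R C → m + b ≤ C → ∀ (x y : Nat) (d : α),
    get2 ((List.range m).foldl (fun g j => if P j then set2 g I (j+b) (v j) else g) g) x y d
      = if x = I ∧ b ≤ y ∧ y < m + b ∧ P (y - b) then v (y - b) else get2 g x y d := by
  intro m
  induction m with
  | zero =>
    intro g _ _ x y d
    simp only [List.range_zero, List.foldl_nil]
    rw [if_neg (by rintro ⟨-, h2, h3, -⟩; omega)]
  | succ m ih =>
    intro g hs hm x y d
    simp only [List.range_succ, List.foldl_append, List.foldl_cons, List.foldl_nil]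
    have hs' : Shape ((List.range m).foldl (fun g j => if P j then set2 g I (j+b) (v j) else g) g) R C :=
      shape_foldl _ (fun g j hg => by
        by_cases hPj : P j
        · simpa [hPj] using shape_set2 hg I (j+b) (v j)
        · simpa [hPj] using hg) _ g hs
    by_cases hP : P m
    · rw [if_pos hP]
      by_cases hxy : x = I ∧ y = m + b
      · obtain ⟨rfl, rfl⟩ := hxy
        rw [get2_set2_self hs' hI (show m + b < C by omega),
            if_pos ⟨rfl, by omega, by omega, by simpa using hP⟩, Nat.add_sub_cancel]
      · rw [get2_set2_ne _ (by
          by_cases hx : x = I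
          · exact Or.inr (fun hh => hxy ⟨hx, hh.symm⟩)
          · exact Or.inl (fun hh => hx hh.symm))]
        rw [ih g hs (by omega) x y d]
        by_cases h1 : x = I ∧ b ≤ y ∧ y < m + b ∧ P (y - b)
        · rw [if_pos h1, if_pos ⟨h1.1, h1.2.1, by omega, h1.2.2.2⟩]
        · have hneg : ¬(x = I ∧ b ≤ y ∧ y < m + 1 + b ∧ P (y - b)) := by
            rintro ⟨hxI, hby, hlt, hPy⟩
            refine h1 ⟨hxI, hby, ?_, hPy⟩
            by_contra hge
            exact hxy ⟨hxI, by omega⟩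
          rw [if_neg h1, if_neg hneg]
    · rw [if_neg hP, ih g hs (by omega) x y d]
      by_cases h1 : x = I ∧ b ≤ y ∧ y < m + b ∧ P (y - b)
      · rw [if_pos h1, if_pos ⟨h1.1, h1.2.1, by omega, h1.2.2.2⟩]
      · have hneg : ¬(x = I ∧ b ≤ y ∧ y < m + 1 + b ∧ P (y - b)) := by
          rintro ⟨hxI, hby, hlt, hPy⟩
          by_cases hy : y < m + b
          · exact h1 ⟨hxI, hby, hy, hPy⟩
          · have hyb : y - b = m := by omega
            rw [hyb] at hPy
            exact hP hPy
        rw [if_neg h1, if_neg hneg]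

lemma outer_char {α : Type} (P : Nat → Nat → Prop) [∀ i j, Decidable (P i j)]
    (v : Nat → Nat → α) (a b : Nat) {R C : Nat} :
    ∀ (r m : Nat) (g : List (List α)), Shape g R C → r + a ≤ R → m + b ≤ C →
    ∀ (x y : Nat) (d : α),
    get2 ((List.range r).foldl (fun g i =>
      (List.range m).foldl (fun g j => if P i j then set2 g (i+a) (j+b) (v i j) else g) g) g) x y d
      = if a ≤ x ∧ x < r + a ∧ b ≤ y ∧ y < m + b ∧ P (x-a) (y-b) then v (x-a) (y-b)
        else get2 g x y d := by
  intro r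
  induction r with
  | zero =>
    intro m g _ _ _ x y d
    simp only [List.range_zero, List.foldl_nil]
    rw [if_neg (by rintro ⟨h1, h2, -⟩; omega)]
  | succ r ih =>
    intro m g hs hr hm x y d
    simp only [List.range_succ, List.foldl_append, List.foldl_cons, List.foldl_nil]
    have hs' : Shape ((List.range r).foldl (fun g i =>
        (List.range m).foldl (fun g j => if P i j then set2 g (i+a) (j+b) (v i j) else g) g) g) R C :=
      shape_foldl _ (fun g i hg => shape_foldl _ (fun g j hg' => by
        by_cases hPj : P i j
        · simpa [hPj] using shape_set2 hg' (i+a) (j+b) (v i j)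
        · simpa [hPj] using hg') _ g hg) _ g hs
    rw [inner_char (P r) (v r) (r+a) b (show r + a < R by omega) m _ hs' (by omega) x y d]
    by_cases hx : x = r + a
    · subst hx
      by_cases hc : b ≤ y ∧ y < m + b ∧ P r (y - b)
      · rw [if_pos ⟨rfl, hc.1, hc.2.1, hc.2.2⟩,
            if_pos ⟨by omega, by omega, hc.1, hc.2.1, by rw [Nat.add_sub_cancel]; exact hc.2.2⟩,
            Nat.add_sub_cancel]
      · have hneg1 : ¬(r + a = r + a ∧ b ≤ y ∧ y < m + b ∧ P r (y - b)) := by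
          rintro ⟨-, k1, k2, k3⟩; exact hc ⟨k1, k2, k3⟩
        rw [if_neg hneg1, ih m g hs (by omega) hm (r + a) y d,
            if_neg (by rintro ⟨-, k2, -⟩; omega),
            if_neg (by rintro ⟨-, -, k3, k4, k5⟩; exact hc ⟨k3, k4, by rwa [Nat.add_sub_cancel] at k5⟩)]
    · rw [if_neg (by rintro ⟨k, -⟩; exact hx k), ih m g hs (by omega) hm x y d]
      by_cases h1 : a ≤ x ∧ x < r + a ∧ b ≤ y ∧ y < m + b ∧ P (x-a) (y-b)
      · rw [if_pos h1, if_pos ⟨h1.1, by omega, h1.2.2⟩]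
      · rw [if_neg h1, if_neg (by rintro ⟨k1, k2, k3, k4, k5⟩; exact h1 ⟨k1, by omega, k3, k4, k5⟩)]

lemma get2_replicate {α : Type} (R C x y : Nat) (v : α) :
    get2 (List.replicate R (List.replicate C v)) x y v = v := by
  unfold get2
  by_cases h : x < R
  · rw [List.getD_eq_getElem _ [] (by simpa using h), List.getElem_replicate]
    by_cases h2 : y < C
    · rw [List.getD_eq_getElem _ v (by simpa using h2), List.getElem_replicate]
    · have h1 : (List.replicate C v).getD y v = v := by
        rw [List.getD_eq_getElem?_getD, List.getElem?_eq_none (by simpa using h2)]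
        rfl
      rw [h1]
  · have h1 : (List.replicate R (List.replicate C v)).getD x [] = ([] : List α) := by
      rw [List.getD_eq_getElem?_getD, List.getElem?_eq_none (by simpa using h)]
      rfl
    rw [h1]
    simp [List.getD]

lemma new_char (img : List (List Int)) (x y : Nat) :
    get2 (newGrid img) x y none
      = if 1 ≤ x ∧ x ≤ img.length ∧ 1 ≤ y ∧ y ≤ img.length ∧ get2 img (x-1) (y-1) 0 = 255
        then some 255 else none := by
  have h := outer_char (fun i j => get2 img i j 0 = 255) (fun i j => some (get2 img i j 0)) 1 1
    img.length img.length
    (List.replicate (img.length+2) (List.replicate (img.length+2) (none : Option Int)))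
    (shape_replicate _ _ _) (by omega) (by omega) x y (none : Option Int)
  refine Eq.trans (?_ : get2 (newGrid img) x y none = _) (Eq.trans h ?_)
  · rfl
  · by_cases hc : 1 ≤ x ∧ x ≤ img.length ∧ 1 ≤ y ∧ y ≤ img.length ∧ get2 img (x-1) (y-1) 0 = 255
    · rw [if_pos ⟨hc.1, by omega, hc.2.2.1, by omega, hc.2.2.2.2⟩, if_pos hc]
      show some (get2 img (x-1) (y-1) 0) = some 255
      rw [hc.2.2.2.2]
    · rw [if_neg (by rintro ⟨k1, k2, k3, k4, k5⟩; exact hc ⟨k1, by omega, k3, by omega, k5⟩),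
          if_neg hc, get2_replicate]

lemma res_entry (img : List (List Int)) (i j : Nat) (hi : i < img.length) (hj : j < img.length) :
    get2 (resGrid img) (i+1) (j+1) " " =
      if get2 img i j 0 = 255 then
        if (j+1 < img.length ∧ get2 img i (j+1) 0 = 255) ∧ (1 ≤ i ∧ get2 img (i-1) j 0 = 255) ∧
           (1 ≤ j ∧ get2 img i (j-1) 0 = 255) ∧ (i+1 < img.length ∧ get2 img (i+1) j 0 = 255)
        then "i" else "b"
      else " " := by
  have h := outer_char (fun i0 j0 => get2 (newGrid img) (i0+1) (j0+1) none = some 255)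
    (fun i0 j0 => fA (hA (hA (hA (hA (get2 (newGrid img) (i0+1) (j0+1) none)
      (get2 (newGrid img) (i0+1) (j0+1+1) none)) (get2 (newGrid img) i0 (j0+1) none))
      (get2 (newGrid img) (i0+1) j0 none)) (get2 (newGrid img) (i0+1+1) (j0+1) none)))
    1 1 img.length img.length
    (List.replicate (img.length+2) (List.replicate (img.length+2) " "))
    (shape_replicate _ _ _) (by omega) (by omega) (i+1) (j+1) " "
  refine Eq.trans (?_ : get2 (resGrid img) (i+1) (j+1) " " = _) (Eq.trans h ?_)
  · rfl
  · simp only [Nat.add_sub_cancel]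
    by_cases hW : get2 img i j 0 = 255
    · have ec : get2 (newGrid img) (i+1) (j+1) none = some 255 := by
        rw [new_char]; exact if_pos ⟨by omega, by omega, by omega, by omega, by simpa using hW⟩
      have e1 : get2 (newGrid img) (i+1) (j+1+1) none
          = if j+1 < img.length ∧ get2 img i (j+1) 0 = 255 then some 255 else none := by
        rw [new_char]; simp only [Nat.add_sub_cancel]
        exact if_congr ⟨fun ⟨_,_,_,k4,k5⟩ => ⟨k4,k5⟩,
          fun ⟨k1,k2⟩ => ⟨by omega, by omega, by omega, k1, k2⟩⟩ rfl rfl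
      have e2 : get2 (newGrid img) i (j+1) none
          = if 1 ≤ i ∧ get2 img (i-1) j 0 = 255 then some 255 else none := by
        rw [new_char]; simp only [Nat.add_sub_cancel]
        exact if_congr ⟨fun ⟨k1,_,_,_,k5⟩ => ⟨k1,k5⟩,
          fun ⟨k1,k2⟩ => ⟨k1, by omega, by omega, by omega, k2⟩⟩ rfl rfl
      have e3 : get2 (newGrid img) (i+1) j none
          = if 1 ≤ j ∧ get2 img i (j-1) 0 = 255 then some 255 else none := by
        rw [new_char]; simp only [Nat.add_sub_cancel]
        exact if_congr ⟨fun ⟨_,_,k3,_,k5⟩ => ⟨k3,k5⟩,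
          fun ⟨k1,k2⟩ => ⟨by omega, by omega, k1, by omega, k2⟩⟩ rfl rfl
      have e4 : get2 (newGrid img) (i+1+1) (j+1) none
          = if i+1 < img.length ∧ get2 img (i+1) j 0 = 255 then some 255 else none := by
        rw [new_char]; simp only [Nat.add_sub_cancel]
        exact if_congr ⟨fun ⟨_,k2,_,_,k5⟩ => ⟨k2,k5⟩,
          fun ⟨k1,k2⟩ => ⟨by omega, k1, by omega, by omega, k2⟩⟩ rfl rfl
      rw [if_pos ⟨by omega, by omega, by omega, by omega, ec⟩, if_pos hW, ec, e1, e2, e3, e4]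
      by_cases h1 : j+1 < img.length ∧ get2 img i (j+1) 0 = 255 <;>
      by_cases h2 : 1 ≤ i ∧ get2 img (i-1) j 0 = 255 <;>
      by_cases h3 : 1 ≤ j ∧ get2 img i (j-1) 0 = 255 <;>
      by_cases h4 : i+1 < img.length ∧ get2 img (i+1) j 0 = 255 <;>
      simp [h1, h2, h3, h4, hA, fA]
    · have hcen : ¬(1 ≤ i+1 ∧ i+1 < img.length+1 ∧ 1 ≤ j+1 ∧ j+1 < img.length+1 ∧
          get2 (newGrid img) (i+1) (j+1) none = some 255) := by
        rintro ⟨-, -, -, -, h5⟩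
        rw [new_char] at h5
        by_cases hc : 1 ≤ i+1 ∧ i+1 ≤ img.length ∧ 1 ≤ j+1 ∧ j+1 ≤ img.length ∧
            get2 img (i+1-1) (j+1-1) 0 = 255
        · exact hW (by simpa using hc.2.2.2.2)
        · rw [if_neg hc] at h5; exact absurd h5 (by simp)
      rw [if_neg hcen, if_neg hW, get2_replicate]

lemma IB_entry (img : List (List Int)) (i j : Nat) (hi : i < img.length) (hj : j < img.length) :
    get2 (IB img) i j " " = get2 (resGrid img) (i+1) (j+1) " " := by
  have h := outer_char (fun (_ _ : Nat) => True)
    (fun k l => get2 (resGrid img) (k+1) (l+1) " ") 0 0 img.length img.length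
    (List.replicate img.length (List.replicate img.length " "))
    (shape_replicate img.length img.length " ") (by omega) (by omega) i j " "
  refine Eq.trans (?_ : get2 (IB img) i j " " = _) (Eq.trans h ?_)
  · rfl
  · rw [if_pos ⟨by omega, by omega, by omega, by omega, trivial⟩]
    rfl

-- B-side: membership characterisation of the white-coordinate set
lemma whiteSet_mem (img : List (List Int)) (a b : Int) :
    ((a, b) ∈ whiteSet img) ↔
      (0 ≤ a ∧ a < (img.length : Int) ∧ 0 ≤ b ∧ b < (img.length : Int) ∧
       get2 img a.toNat b.toNat 0 = 255) := by
  unfold whiteSet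
  rw [PySem.Set.mem_ofList, List.mem_flatMap]
  constructor
  · rintro ⟨i, hi, hmem⟩
    rw [List.mem_filterMap] at hmem
    obtain ⟨j, hj, hopt⟩ := hmem
    rw [List.mem_range] at hi hj
    by_cases hc : (img.getD i []).getD j 0 = 255
    · rw [if_pos hc, Option.some_inj, Prod.ext_iff] at hopt
      obtain ⟨ha, hb⟩ := hopt
      simp only at ha hb
      subst ha; subst hb
      refine ⟨by positivity, by exact_mod_cast hi, by positivity, by exact_mod_cast hj, ?_⟩
      simpa [get2] using hc
    · rw [if_neg hc] at hopt; exact absurd hopt (by simp)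
  · rintro ⟨ha0, han, hb0, hbn, hw⟩
    refine ⟨a.toNat, by rw [List.mem_range]; omega, ?_⟩
    rw [List.mem_filterMap]
    refine ⟨b.toNat, by rw [List.mem_range]; omega, ?_⟩
    rw [if_pos (by simpa [get2] using hw), Option.some_inj]
    have : ((a.toNat : Int)) = a := Int.toNat_of_nonneg ha0
    have hbb : ((b.toNat : Int)) = b := Int.toNat_of_nonneg hb0
    rw [this, hbb]

lemma shiftSet_mem (w : PySem.Set (Int × Int)) (d : Int × Int) (p : Int × Int) :
    p ∈ shiftSet w d ↔ (p.1 + d.1, p.2 + d.2) ∈ w := by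
  unfold shiftSet
  rw [PySem.Set.mem_ofList, List.mem_map]
  constructor
  · rintro ⟨q, hq, hqe⟩
    have h1 : q.1 - d.1 = p.1 := congrArg Prod.fst hqe
    have h2 : q.2 - d.2 = p.2 := congrArg Prod.snd hqe
    have : q = (p.1 + d.1, p.2 + d.2) := by
      cases q; cases p; simp_all; omega
    rwa [← this]
  · intro hq
    exact ⟨(p.1 + d.1, p.2 + d.2), hq, by cases p; simp⟩

-- membership in B's interior = in white and all four neighbours in white
lemma interiorFold_mem (img : List (List Int)) (p : Int × Int) :
    (p ∈ [((0 : Int), (1 : Int)), (-1, 0), (0, -1), (1, 0)].foldl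
        (fun acc d => PySem.Set.inter acc (shiftSet (whiteSet img) d)) (whiteSet img)) ↔
      (p ∈ whiteSet img ∧ (p.1, p.2 + 1) ∈ whiteSet img ∧ (p.1 - 1, p.2) ∈ whiteSet img ∧
       (p.1, p.2 - 1) ∈ whiteSet img ∧ (p.1 + 1, p.2) ∈ whiteSet img) := by
  simp only [List.foldl_cons, List.foldl_nil, PySem.Set.mem_inter, shiftSet_mem]
  constructor
  · rintro ⟨⟨⟨⟨h0, h1⟩, h2⟩, h3⟩, h4⟩
    refine ⟨h0, by simpa using h1, by simpa using h2, by simpa using h3, by simpa using h4⟩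
  · rintro ⟨h0, h1, h2, h3, h4⟩
    exact ⟨⟨⟨⟨h0, by simpa using h1⟩, by simpa using h2⟩, by simpa using h3⟩, by simpa using h4⟩

lemma IBalt_entry (img : List (List Int)) (i j : Nat) (hi : i < img.length)
    (hj : j < img.length) :
    get2 (IB_alt img) i j " " =
      (let white := whiteSet img
       let interior := [((0 : Int), (1 : Int)), (-1, 0), (0, -1), (1, 0)].foldl
           (fun acc d => PySem.Set.inter acc (shiftSet white d)) white
       if ((i : Int), (j : Int)) ∉ white then " "
       else if ((i : Int), (j : Int)) ∈ interior then "i" else "b") := by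
  simp only [IB_alt, get2]
  rw [List.getD_eq_getElem _ [] (by simpa using hi), List.getElem_map, List.getElem_range,
      List.getD_eq_getElem _ " " (by simpa using hj), List.getElem_map, List.getElem_range]

-- cast helpers for the four neighbour memberships, at a cell (i, j) with i, j < n
lemma white_center (img : List (List Int)) (i j : Nat) (hi : i < img.length)
    (hj : j < img.length) :
    (((i : Int), (j : Int)) ∈ whiteSet img) ↔ get2 img i j 0 = 255 := by
  rw [whiteSet_mem]
  constructor
  · rintro ⟨-, -, -, -, h⟩; simpa using h
  · intro h
    exact ⟨by positivity, by exact_mod_cast hi, by positivity, by exact_mod_cast hj,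
      by simpa using h⟩

lemma white_right (img : List (List Int)) (i j : Nat) (hi : i < img.length) :
    (((i : Int), (j : Int) + 1) ∈ whiteSet img) ↔
      (j + 1 < img.length ∧ get2 img i (j+1) 0 = 255) := by
  have hc : ((j : Int) + 1) = ((j + 1 : Nat) : Int) := by push_cast; ring
  rw [hc, whiteSet_mem]
  simp only [Int.toNat_natCast]
  constructor
  · rintro ⟨-, -, -, k, h⟩; exact ⟨by exact_mod_cast k, h⟩
  · rintro ⟨k, h⟩
    exact ⟨by positivity, by exact_mod_cast hi, by positivity, by exact_mod_cast k, h⟩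

lemma white_up (img : List (List Int)) (i j : Nat) (hi : i < img.length) (hj : j < img.length) :
    (((i : Int) - 1, (j : Int)) ∈ whiteSet img) ↔
      (1 ≤ i ∧ get2 img (i-1) j 0 = 255) := by
  rcases i with _ | k
  · rw [whiteSet_mem]
    constructor
    · rintro ⟨h0, -⟩; exfalso; omega
    · rintro ⟨h0, -⟩; exact absurd h0 (by omega)
  · have hc : (((k+1 : Nat)) : Int) - 1 = ((k : Nat) : Int) := by push_cast; ring
    rw [hc, whiteSet_mem]
    simp only [Int.toNat_natCast]
    constructor
    · rintro ⟨-, k1, -, -, h⟩; exact ⟨by omega, by simpa using h⟩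
    · rintro ⟨-, h⟩
      refine ⟨by positivity, ?_, by positivity, by exact_mod_cast hj, by simpa using h⟩
      have : k < img.length := by omega
      exact_mod_cast this

lemma white_left (img : List (List Int)) (i j : Nat) (hi : i < img.length) (hj : j < img.length) :
    (((i : Int), (j : Int) - 1) ∈ whiteSet img) ↔
      (1 ≤ j ∧ get2 img i (j-1) 0 = 255) := by
  rcases j with _ | k
  · rw [whiteSet_mem]
    constructor
    · rintro ⟨-, -, h0, -⟩; exfalso; omega
    · rintro ⟨h0, -⟩; exact absurd h0 (by omega)
  · have hc : (((k+1 : Nat)) : Int) - 1 = ((k : Nat) : Int) := by push_cast; ring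
    rw [hc, whiteSet_mem]
    simp only [Int.toNat_natCast]
    constructor
    · rintro ⟨-, -, -, k1, h⟩; exact ⟨by omega, by simpa using h⟩
    · rintro ⟨-, h⟩
      refine ⟨by positivity, by exact_mod_cast hi, by positivity, ?_, by simpa using h⟩
      have : k < img.length := by omega
      exact_mod_cast this

lemma white_down (img : List (List Int)) (i j : Nat) (hj : j < img.length) :
    (((i : Int) + 1, (j : Int)) ∈ whiteSet img) ↔
      (i + 1 < img.length ∧ get2 img (i+1) j 0 = 255) := by
  have hc : ((i : Int) + 1) = ((i + 1 : Nat) : Int) := by push_cast; ring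
  rw [hc, whiteSet_mem]
  simp only [Int.toNat_natCast]
  constructor
  · rintro ⟨-, k, -, -, h⟩; exact ⟨by exact_mod_cast k, h⟩
  · rintro ⟨k, h⟩
    exact ⟨by positivity, by exact_mod_cast k, by positivity, by exact_mod_cast hj, h⟩

lemma entry_eq (img : List (List Int)) (i j : Nat) (hi : i < img.length) (hj : j < img.length) :
    get2 (IB img) i j " " = get2 (IB_alt img) i j " " := by
  rw [IB_entry img i j hi hj, res_entry img i j hi hj, IBalt_entry img i j hi hj]
  simp only
  by_cases hW : get2 img i j 0 = 255
  · rw [if_pos hW, if_neg (not_not_intro ((white_center img i j hi hj).mpr hW))]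
    refine if_congr ?_ rfl rfl
    rw [interiorFold_mem]
    constructor
    · rintro ⟨c1, c2, c3, c4⟩
      exact ⟨(white_center img i j hi hj).mpr hW, (white_right img i j hi).mpr c1,
        (white_up img i j hi hj).mpr c2, (white_left img i j hi hj).mpr c3,
        (white_down img i j hj).mpr c4⟩
    · rintro ⟨-, c1, c2, c3, c4⟩
      exact ⟨(white_right img i j hi).mp c1, (white_up img i j hi hj).mp c2,
        (white_left img i j hi hj).mp c3, (white_down img i j hj).mp c4⟩
  · rw [if_neg hW, if_pos (fun hmem => hW ((white_center img i j hi hj).mp hmem))]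

lemma shape_IB (img : List (List Int)) : Shape (IB img) img.length img.length := by
  have h : Shape ((List.range img.length).foldl (fun g i =>
      (List.range img.length).foldl (fun g j => set2 g i j (get2 (resGrid img) (i+1) (j+1) " ")) g)
      (List.replicate img.length (List.replicate img.length " "))) img.length img.length :=
    shape_foldl _ (fun g i hg => shape_foldl _ (fun g j hg' => shape_set2 hg' _ _ _) _ g hg) _ _
      (shape_replicate _ _ _)
  exact h

lemma shape_IBalt (img : List (List Int)) : Shape (IB_alt img) img.length img.length := by
  constructor
  · simp [IB_alt]
  · intro r hr
    simp only [IB_alt, List.mem_map] at hr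
    obtain ⟨a, -, rfl⟩ := hr
    simp

lemma grid_ext {α : Type} (d : α) {n : Nat} {g g' : List (List α)}
    (h : Shape g n n) (h' : Shape g' n n)
    (he : ∀ i j, i < n → j < n → get2 g i j d = get2 g' i j d) : g = g' := by
  refine List.ext_getElem (by rw [h.1, h'.1]) ?_
  intro i hi1 hi2
  have hrow : g[i].length = n := h.2 _ (List.getElem_mem hi1)
  have hrow' : g'[i].length = n := h'.2 _ (List.getElem_mem hi2)
  refine List.ext_getElem (by rw [hrow, hrow']) ?_
  intro j hj1 hj2
  have he' := he i j (by rw [← h.1]; exact hi1) (by rw [← hrow]; exact hj1)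
  unfold get2 at he'
  rw [List.getD_eq_getElem g [] hi1, List.getD_eq_getElem _ d hj1,
      List.getD_eq_getElem g' [] hi2, List.getD_eq_getElem _ d hj2] at he'
  exact he'

-- ===== VERDICT (by name: the statement is the Claim_ definition above) =====
theorem IB_spec : Claim_equal_IB := by
  intro img _ _
  unfold Spec_IB
  exact grid_ext " " (shape_IB img) (shape_IBalt img) (fun i j hi hj => entry_eq img i j hi hj)
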